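-- pv_equiv track=rewrite | github.com/CSU-CS150B/handouts | ExampleCode/Module13SlideCode.py | get_successes
-- ===== SOURCE A (Python) =====
-- def get_successes(rolls, dc):
--     #return len([i for i in rolls if i >= dc]) + len([20 for i in rolls if i == 20]) - len([1 for i in rolls if i == 1])
--     count = 0
--     for roll in rolls:
--         if roll == 20:
--             count += 2
--         elif roll == 1:
--             count -= 2
--         elif roll >= dc:
--             count += 1
--     return count
-- ===== SOURCE B (Python) =====
-- def get_successes(rolls, dc):
--     twenties = rolls.count(20)
--     ones = rolls.count(1)
--     normal = sum(1 for r in rolls if r != 20 and r != 1 and r >= dc)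
--     return 2 * twenties - 2 * ones + normal
-- ===== Notes on version B (the rewrite author's own statement) =====
-- stated objective: alternative
-- what changed: Replaces the single branched accumulator loop with three independent aggregations (count of 20s, count of 1s, count of other rolls >= dc) combined arithmetically.
import Mathlib
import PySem

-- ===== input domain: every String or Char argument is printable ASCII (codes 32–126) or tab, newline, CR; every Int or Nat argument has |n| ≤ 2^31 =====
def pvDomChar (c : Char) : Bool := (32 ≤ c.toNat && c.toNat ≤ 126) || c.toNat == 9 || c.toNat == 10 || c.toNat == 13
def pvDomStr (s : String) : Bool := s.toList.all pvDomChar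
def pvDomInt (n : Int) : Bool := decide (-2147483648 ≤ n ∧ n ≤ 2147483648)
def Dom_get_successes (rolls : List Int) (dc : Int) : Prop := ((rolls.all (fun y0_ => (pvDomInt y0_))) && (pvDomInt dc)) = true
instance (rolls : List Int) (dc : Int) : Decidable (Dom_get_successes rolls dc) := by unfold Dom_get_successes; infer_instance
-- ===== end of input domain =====

-- B replaces A's single branched accumulator loop with three independent counts combined arithmetically (alternative decomposition, same cost).


-- ===== PORT A =====
def get_successes (rolls : List Int) (dc : Int) : Int :=
  rolls.foldl (fun count roll =>
    if roll = 20 then count + 2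
    else if roll = 1 then count - 2
    else if roll ≥ dc then count + 1
    else count) 0

-- ===== PORT B =====
def get_successes_alt (rolls : List Int) (dc : Int) : Int :=
  let twenties : Int := PySem.List.count rolls 20
  let ones : Int := PySem.List.count rolls 1
  let normal : Int := ((rolls.filter (fun r => r ≠ 20 ∧ r ≠ 1 ∧ r ≥ dc)).length : Int)
  2 * twenties - 2 * ones + normal

-- ===== PRECONDITION & SPEC =====
def Spec_get_successes (rolls : List Int) (dc : Int) (out : Int) : Prop := out = get_successes_alt rolls dc
instance (rolls : List Int) (dc : Int) (out : Int) : Decidable (Spec_get_successes rolls dc out) := by unfold Spec_get_successes; infer_instance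

-- ===== CLAIM =====
def Claim_equal_get_successes : Prop := ∀ (rolls : List Int) (dc : Int), Dom_get_successes rolls dc → Spec_get_successes rolls dc (get_successes rolls dc)

-- ===== LEMMAS AND PROOFS =====
theorem get_successes_foldl_shift (rolls : List Int) (dc c : Int) :
    rolls.foldl (fun count roll =>
      if roll = 20 then count + 2
      else if roll = 1 then count - 2
      else if roll ≥ dc then count + 1
      else count) c = c + get_successes rolls dc := by
  induction rolls generalizing c with
  | nil => simp [get_successes]
  | cons r rs ih =>
    simp only [get_successes, List.foldl_cons]
    rw [ih, ih]
    split_ifs <;> ring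

theorem get_successes_eq (rolls : List Int) (dc : Int) :
    get_successes rolls dc = get_successes_alt rolls dc := by
  induction rolls with
  | nil => simp [get_successes, get_successes_alt, PySem.List.count]
  | cons r rs ih =>
    simp only [get_successes, List.foldl_cons] at *
    rw [get_successes_foldl_shift,
        show get_successes rs dc = get_successes_alt rs dc from ih]
    simp only [get_successes_alt, PySem.List.count, List.filter_cons]
    split_ifs with h1 h2 h3 <;>
      simp_all [decide_eq_true_eq] <;> omega

-- ===== VERDICT =====
theorem get_successes_spec : Claim_equal_get_successes := by
  intro rolls dc _
  unfold Spec_get_successes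
  exact get_successes_eq rolls dc
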